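-- pv_equiv track=rewrite | github.com/locharp/code-snippets | Coding Ninjas/Hard/K Sum Subset.py | f
-- ===== SOURCE A (Python) =====
-- def f( arr, k, m, i ):
--
--     p = m
--
--     for j in range( i, len( arr ) ):
--         if m + arr[j] > k:
--             continue
--         elif m + arr[j] == k:
--             return k
--
--         q = f( arr, k, m + arr[j], j + 1 )
--
--         if q > p:
--             p = q
--
--     return p
-- ===== SOURCE B (Python) =====
-- def f(arr, k, m, i):
--     tail = arr[i:]
--     if k - m in tail:
--         return k
--     reach = {m}
--     for a in tail:
--         reach |= {s + a for s in reach if s + a <= k}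
--     return max(reach)
-- ===== Notes on version B (the rewrite author's own statement) =====
-- stated objective: alternative
-- what changed: Replaced A's recursive pruned DFS over subsets by an upfront single-element exact-hit check followed by a forward subset-sum DP over the set of distinct reachable sums (dedup; A re-explores equal partial sums), returning the set's maximum.
-- outside the precondition, e.g. on f([1, 2], 3, 0, -1): A returns 3, B returns 2; on f([1], 3, 0, -5): A raises IndexError, B returns 1
import Mathlib
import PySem

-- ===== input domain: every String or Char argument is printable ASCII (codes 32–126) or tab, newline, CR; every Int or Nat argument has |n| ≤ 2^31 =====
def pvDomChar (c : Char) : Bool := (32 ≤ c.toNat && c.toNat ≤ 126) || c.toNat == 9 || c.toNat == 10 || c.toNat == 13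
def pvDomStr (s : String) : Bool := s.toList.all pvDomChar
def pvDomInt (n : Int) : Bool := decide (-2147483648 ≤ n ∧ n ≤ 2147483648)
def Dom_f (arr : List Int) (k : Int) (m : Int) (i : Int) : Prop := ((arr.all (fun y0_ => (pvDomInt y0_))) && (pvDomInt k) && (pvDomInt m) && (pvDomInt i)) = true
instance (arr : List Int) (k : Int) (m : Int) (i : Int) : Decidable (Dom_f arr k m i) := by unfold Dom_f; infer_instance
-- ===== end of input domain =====

-- B replaces A's pruned recursive subset DFS with an upfront exact-hit check plus a forward
-- reachable-sums set DP (deduplicating equal partial sums); same return value on Pre_f.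

-- ===== PORT A =====
-- A's loop over range(i, len(arr)) fused with its recursion: for j :: rest drawn from the
-- range, the deep call f(arr, k, m+arr[j], j+1) scans exactly rest, so both recursions are
-- structural on the range list; arr[j] is pyGet? (in range whenever 0 ≤ i, per Pre_f).
def fGo (arr : List Int) (k : Int) : List Int → Int → Int → Int
  | [], _, p => p
  | j :: rest, m, p =>
    let a := (PySem.List.pyGet? arr j).getD 0
    if m + a > k then fGo arr k rest m p
    else if m + a = k then k
    else
      let q := fGo arr k rest (m + a) (m + a)
      fGo arr k rest m (if q > p then q else p)

def f (arr : List Int) (k : Int) (m : Int) (i : Int) : Int :=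
  fGo arr k (PySem.List.pyRange i arr.length 1) m m

-- ===== PORT B =====
-- reach |= {s + a for s in reach if s + a <= k}
def fStep (k : Int) (reach : PySem.Set Int) (a : Int) : PySem.Set Int :=
  PySem.Set.union reach
    (reach.foldl (fun t s => if s + a ≤ k then PySem.Set.add t (s + a) else t) PySem.Set.empty)

def f_alt (arr : List Int) (k : Int) (m : Int) (i : Int) : Int :=
  let tail := PySem.List.slice arr (some i) none
  if (k - m) ∈ tail then k
  else
    let reach := tail.foldl (fStep k) (PySem.Set.ofList [m])
    (PySem.List.max? reach (fun x => x)).getD 0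

-- ===== PRECONDITION & SPEC =====
-- Pre_f restricts to the natural domain 0 ≤ i (i is a scan index into arr): a negative i
-- makes A's range(i, len(arr)) index with Python wraparound — rescanning elements twice or
-- raising IndexError for i < -len(arr) — which is an accident of A's implementation.
def Pre_f (arr : List Int) (k : Int) (m : Int) (i : Int) : Prop := 0 ≤ i
instance (arr : List Int) (k : Int) (m : Int) (i : Int) : Decidable (Pre_f arr k m i) := by
  unfold Pre_f; infer_instance

def pvWitness_f : List Int × Int × Int × Int := ([1, 2, 3], 4, 0, 0)

def Spec_f (arr : List Int) (k : Int) (m : Int) (i : Int) (out : Int) : Prop :=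
  out = f_alt arr k m i
instance (arr : List Int) (k : Int) (m : Int) (i : Int) (out : Int) : Decidable (Spec_f arr k m i out) := by
  unfold Spec_f; infer_instance

-- ===== CLAIM (what is proved, stated in full; the proofs are below) =====
def Claim_equal_f : Prop := ∀ (arr : List Int) (k : Int) (m : Int) (i : Int), Dom_f arr k m i → Pre_f arr k m i → Spec_f arr k m i (f arr k m i)

-- ===== LEMMAS AND PROOFS =====

-- Spec-level value: the maximum sum reachable from m by adding later elements, each
-- intermediate (hence final) sum required to stay ≤ k.
def maxR (k : Int) : List Int → Int → Int
  | [], m => m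
  | a :: rest, m => if m + a ≤ k then max (maxR k rest m) (maxR k rest (m + a)) else maxR k rest m

-- Spec-level list of all reachable sums.
def reachL (k : Int) : List Int → Int → List Int
  | [], m => [m]
  | a :: rest, m => if m + a ≤ k then reachL k rest m ++ reachL k rest (m + a) else reachL k rest m

theorem le_maxR (k : Int) (vs : List Int) (m : Int) : m ≤ maxR k vs m := by
  induction vs generalizing m with
  | nil => simp [maxR]
  | cons a rest ih =>
    simp only [maxR]; split
    · exact le_trans (ih m) (le_max_left _ _)
    · exact ih m

theorem maxR_le (k : Int) (vs : List Int) (m : Int) (h : m ≤ k) : maxR k vs m ≤ k := by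
  induction vs generalizing m with
  | nil => simpa [maxR]
  | cons a rest ih =>
    simp only [maxR]; split
    · exact max_le (ih m h) (ih (m + a) (by omega))
    · exact ih m h

theorem maxR_of_gt (k : Int) (vs : List Int) (m : Int) (h : k < m) : maxR k vs m = m := by
  induction vs generalizing m with
  | nil => simp [maxR]
  | cons a rest ih =>
    simp only [maxR]; split
    · have h1 := ih m h
      have h2 := maxR_le k rest (m + a) (by omega)
      omega
    · exact ih m h

theorem mem_reachL_self (k : Int) (vs : List Int) (m : Int) : m ∈ reachL k vs m := by
  induction vs generalizing m with
  | nil => simp [reachL]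
  | cons a rest ih =>
    simp only [reachL]; split
    · simp [ih m]
    · exact ih m

-- one accepted step stays reachable
theorem mem_reachL_step (k : Int) (vs : List Int) (m a : Int)
    (ha : a ∈ vs) (hk : m + a ≤ k) : (m + a) ∈ reachL k vs m := by
  induction vs generalizing m with
  | nil => simp at ha
  | cons b rest ih =>
    simp only [reachL]
    rcases List.mem_cons.mp ha with rfl | hmem
    · rw [if_pos hk]
      exact List.mem_append.mpr (Or.inr (mem_reachL_self k rest (m + a)))
    · split
      · exact List.mem_append.mpr (Or.inl (ih m hmem hk))
      · exact ih m hmem hk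

theorem le_maxR_of_mem_reachL (k : Int) (vs : List Int) (m x : Int)
    (hx : x ∈ reachL k vs m) : x ≤ maxR k vs m := by
  induction vs generalizing m with
  | nil => simp_all [reachL, maxR]
  | cons a rest ih =>
    simp only [reachL, maxR] at hx ⊢
    split at hx
    · rw [if_pos ‹_›]
      rcases List.mem_append.mp hx with h | h
      · exact le_trans (ih m h) (le_max_left _ _)
      · exact le_trans (ih (m + a) h) (le_max_right _ _)
    · rw [if_neg ‹_›]; exact ih m hx

theorem maxR_mem_reachL (k : Int) (vs : List Int) (m : Int) : maxR k vs m ∈ reachL k vs m := by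
  induction vs generalizing m with
  | nil => simp [reachL, maxR]
  | cons a rest ih =>
    simp only [reachL, maxR]; split
    · rcases max_choice (maxR k rest m) (maxR k rest (m + a)) with h | h <;> rw [h] <;>
        simp [ih m, ih (m + a)]
    · exact ih m

-- if an exact hit exists and m ≤ k, the reachable maximum is exactly k
theorem maxR_eq_k_of_hit (k : Int) (vs : List Int) (m : Int)
    (hm : m ≤ k) (hmem : (k - m) ∈ vs) : maxR k vs m = k := by
  have h1 : k ≤ maxR k vs m := by
    have := mem_reachL_step k vs m (k - m) hmem (by omega)
    have := le_maxR_of_mem_reachL k vs m (m + (k - m)) this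
    omega
  have h2 := maxR_le k vs m hm
  omega

-- the value-level A loop: fGo over pyRange i len with pyGet? equals goA over arr.drop i.toNat
def goA (k : Int) : List Int → Int → Int → Int
  | [], _, p => p
  | a :: rest, m, p =>
    if m + a > k then goA k rest m p
    else if m + a = k then k
    else
      let q := goA k rest (m + a) (m + a)
      goA k rest m (if q > p then q else p)

theorem fGo_eq_goA (arr : List Int) (k : Int) :
    ∀ (n : Nat) (i : Int), 0 ≤ i → (arr.length : Int) - i ≤ n →
      ∀ m p, fGo arr k (PySem.List.pyRange i arr.length 1) m p = goA k (arr.drop i.toNat) m p := by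
  intro n
  induction n with
  | zero =>
    intro i hi hn m p
    rw [PySem.List.pyRange_one_eq_nil (by omega)]
    rw [List.drop_eq_nil_of_le (by omega)]
    rfl
  | succ n ih =>
    intro i hi hn m p
    by_cases hlt : i < (arr.length : Int)
    · have hidx : i.toNat < arr.length := by omega
      rw [PySem.List.pyRange_one_cons hlt]
      have hdrop : arr.drop i.toNat = arr[i.toNat] :: arr.drop (i.toNat + 1) :=
        (List.getElem_cons_drop hidx).symm
      have hget : (PySem.List.pyGet? arr i).getD 0 = arr[i.toNat] := by
        rw [PySem.List.pyGet?_eq_some_getElem arr hi (by omega)]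
        rfl
      have htail : (i + 1).toNat = i.toNat + 1 := by omega
      rw [hdrop]
      simp only [fGo, goA, hget]
      have ihrec : ∀ m' p', fGo arr k (PySem.List.pyRange (i + 1) arr.length 1) m' p' =
          goA k (arr.drop (i.toNat + 1)) m' p' := by
        intro m' p'
        rw [← htail]
        exact ih (i + 1) (by omega) (by omega) m' p'
      split
      · exact ihrec m p
      · split
        · rfl
        · rw [ihrec (m + arr[i.toNat]) (m + arr[i.toNat])]
          exact ihrec m _
    · rw [PySem.List.pyRange_one_eq_nil (by omega)]
      rw [List.drop_eq_nil_of_le (by omega)]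
      rfl

theorem goA_of_le (k : Int) (vs : List Int) :
    ∀ m p, m ≤ k → p ≤ k → m ≤ p → goA k vs m p = max p (maxR k vs m) := by
  induction vs with
  | nil =>
    intro m p _ _ hmp
    simp only [goA, maxR]
    exact (max_eq_left hmp).symm
  | cons a rest ih =>
    intro m p hmk hpk hmp
    by_cases h1 : m + a > k
    · simp only [goA, maxR, if_pos h1, if_neg (show ¬ m + a ≤ k by omega)]
      exact ih m p hmk hpk hmp
    · by_cases h2 : m + a = k
      · simp only [goA, maxR, if_neg h1, if_pos h2, if_pos (show m + a ≤ k by omega)]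
        have hk1 : maxR k rest (m + a) = k :=
          le_antisymm (maxR_le k rest (m + a) (by omega))
            (by have := le_maxR k rest (m + a); omega)
        have hk2 : maxR k rest m ≤ k := maxR_le k rest m hmk
        rw [hk1, max_eq_right hk2, max_eq_right hpk]
      · simp only [goA, maxR, if_neg h1, if_neg h2, if_pos (show m + a ≤ k by omega)]
        have hq : goA k rest (m + a) (m + a) = maxR k rest (m + a) := by
          rw [ih (m + a) (m + a) (by omega) (by omega) le_rfl]
          exact max_eq_right (le_maxR k rest (m + a))
        rw [hq]
        have hqk : maxR k rest (m + a) ≤ k := maxR_le k rest (m + a) (by omega)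
        have hif : (if maxR k rest (m + a) > p then maxR k rest (m + a) else p) =
            max p (maxR k rest (m + a)) := by
          by_cases hqp : maxR k rest (m + a) > p
          · rw [if_pos hqp, max_eq_right (le_of_lt hqp)]
          · rw [if_neg hqp, max_eq_left (by omega)]
        rw [hif, ih m _ hmk (max_le hpk hqk) (le_trans hmp (le_max_left _ _)),
          max_right_comm, ← max_assoc]

theorem goA_of_gt (k : Int) (vs : List Int) :
    ∀ m p, k < m → m ≤ p → goA k vs m p = if (k - m) ∈ vs then k else p := by
  induction vs with
  | nil => intro m p _ _; simp [goA]
  | cons a rest ih =>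
    intro m p hk hmp
    simp only [goA, List.mem_cons]
    by_cases h1 : m + a > k
    · rw [if_pos h1, ih m p hk hmp]
      have hne : ¬ (k - m = a) := by omega
      simp [hne]
    · rw [if_neg h1]
      by_cases h2 : m + a = k
      · rw [if_pos h2]
        have heq : k - m = a := by omega
        simp [heq]
      · rw [if_neg h2]
        have hq : goA k rest (m + a) (m + a) = maxR k rest (m + a) := by
          rw [goA_of_le k rest (m + a) (m + a) (by omega) (by omega) le_rfl]
          exact max_eq_right (le_maxR k rest (m + a))
        have hqk : maxR k rest (m + a) ≤ k := maxR_le k rest (m + a) (by omega)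
        rw [hq]
        have hpq : ¬ (maxR k rest (m + a) > p) := by omega
        rw [if_neg hpq, ih m p hk hmp]
        have hne : ¬ (k - m = a) := by omega
        simp [hne]

-- membership in the comprehension fold of fStep
theorem mem_fStep_inner (k a : Int) (S : List Int) :
    ∀ (T : PySem.Set Int) (x : Int),
      x ∈ S.foldl (fun t s => if s + a ≤ k then PySem.Set.add t (s + a) else t) T ↔
        x ∈ T ∨ ∃ s ∈ S, s + a ≤ k ∧ x = s + a := by
  induction S with
  | nil => simp
  | cons s0 rest ih =>
    intro T x
    simp only [List.foldl_cons]
    rw [ih]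
    by_cases h : s0 + a ≤ k
    · rw [if_pos h]
      simp only [PySem.Set.mem_add, List.mem_cons]
      constructor
      · rintro (h' | h')
        · rcases h' with h' | h'
          · exact Or.inl h'
          · exact Or.inr ⟨s0, Or.inl rfl, h, h'⟩
        · rcases h' with ⟨s, hs, hsk, hx⟩
          exact Or.inr ⟨s, Or.inr hs, hsk, hx⟩
      · rintro (h' | ⟨s, hs | hs, hsk, hx⟩)
        · exact Or.inl (Or.inl h')
        · subst hs; exact Or.inl (Or.inr hx)
        · exact Or.inr ⟨s, hs, hsk, hx⟩
    · rw [if_neg h]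
      simp only [List.mem_cons]
      constructor
      · rintro (h' | ⟨s, hs, hsk, hx⟩)
        · exact Or.inl h'
        · exact Or.inr ⟨s, Or.inr hs, hsk, hx⟩
      · rintro (h' | ⟨s, hs | hs, hsk, hx⟩)
        · exact Or.inl h'
        · subst hs; omega
        · exact Or.inr ⟨s, hs, hsk, hx⟩

theorem mem_fStep (k a : Int) (S : PySem.Set Int) (x : Int) :
    x ∈ fStep k S a ↔ x ∈ S ∨ ∃ s ∈ S, s + a ≤ k ∧ x = s + a := by
  unfold fStep
  rw [PySem.Set.mem_union, mem_fStep_inner]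
  simp [PySem.Set.empty]

theorem mem_foldl_fStep (k : Int) (vs : List Int) :
    ∀ (S : PySem.Set Int) (x : Int),
      x ∈ vs.foldl (fStep k) S ↔ ∃ s ∈ S, x ∈ reachL k vs s := by
  induction vs with
  | nil => intro S x; simp [reachL]
  | cons a rest ih =>
    intro S x
    simp only [List.foldl_cons]
    rw [ih]
    constructor
    · rintro ⟨s, hs, hx⟩
      rw [mem_fStep] at hs
      rcases hs with hs | ⟨s0, hs0, hsk, rfl⟩
      · refine ⟨s, hs, ?_⟩
        simp only [reachL]; split <;> simp [hx]
      · refine ⟨s0, hs0, ?_⟩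
        simp only [reachL]
        rw [if_pos hsk]
        simp [hx]
    · rintro ⟨s, hs, hx⟩
      simp only [reachL] at hx
      split at hx
      · rcases List.mem_append.mp hx with h | h
        · exact ⟨s, (mem_fStep k a S s).mpr (Or.inl hs), h⟩
        · exact ⟨s + a, (mem_fStep k a S (s + a)).mpr (Or.inr ⟨s, hs, ‹_›, rfl⟩), h⟩
      · exact ⟨s, (mem_fStep k a S s).mpr (Or.inl hs), hx⟩

-- the DP branch of f_alt computes maxR
theorem fold_max_eq_maxR (k m : Int) (vs : List Int) :
    (PySem.List.max? (vs.foldl (fStep k) (PySem.Set.ofList [m])) (fun x => x)).getD 0 =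
      maxR k vs m := by
  set reach := vs.foldl (fStep k) (PySem.Set.ofList [m]) with hreach
  have hmem : ∀ x, x ∈ reach ↔ x ∈ reachL k vs m := by
    intro x
    rw [hreach, mem_foldl_fStep]
    constructor
    · rintro ⟨s, hs, hx⟩
      simp only [PySem.Set.mem_ofList, List.mem_singleton] at hs
      subst hs; exact hx
    · intro hx; exact ⟨m, by simp [PySem.Set.mem_ofList], hx⟩
  have hne : reach ≠ [] := by
    intro h
    have := (hmem m).mpr (mem_reachL_self k vs m)
    simp [h] at this
  obtain ⟨v, hv⟩ : ∃ v, PySem.List.max? reach (fun x => x) = some v := by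
    cases h : PySem.List.max? reach (fun x => x) with
    | none => exact absurd ((PySem.List.max?_eq_none_iff reach _).mp h) hne
    | some v => exact ⟨v, rfl⟩
  rw [hv]
  have hvmem : v ∈ reach := PySem.List.max?_mem hv
  have hvmax := PySem.List.max?_isMax hv
  simp only [Option.getD_some]
  have h1 : v ≤ maxR k vs m := le_maxR_of_mem_reachL k vs m v ((hmem v).mp hvmem)
  have h2 : maxR k vs m ≤ v := hvmax _ ((hmem _).mpr (maxR_mem_reachL k vs m))
  omega

theorem f_alt_eq (arr : List Int) (k m i : Int) (hi : 0 ≤ i) :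
    f_alt arr k m i =
      if (k - m) ∈ arr.drop i.toNat then k else maxR k (arr.drop i.toNat) m := by
  have hslice : PySem.List.slice arr (some i) none = arr.drop i.toNat :=
    PySem.List.slice_from arr hi
  unfold f_alt
  simp only [hslice]
  by_cases h : (k - m) ∈ arr.drop i.toNat
  · simp [h]
  · simp [h, fold_max_eq_maxR k m (arr.drop i.toNat)]

theorem f_eq_goA (arr : List Int) (k m i : Int) (hi : 0 ≤ i) :
    f arr k m i = goA k (arr.drop i.toNat) m m := by
  unfold f
  exact fGo_eq_goA arr k (arr.length) i hi (by omega) m m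

-- ===== VERDICT (by name: the statement is the Claim_ definition above) =====
theorem f_spec : Claim_equal_f := by
  intro arr k m i _ hpre
  unfold Pre_f at hpre
  unfold Spec_f
  rw [f_eq_goA arr k m i hpre, f_alt_eq arr k m i hpre]
  by_cases hmk : m ≤ k
  · rw [goA_of_le k _ m m hmk hmk le_rfl]
    by_cases hmem : (k - m) ∈ arr.drop i.toNat
    · rw [if_pos hmem, maxR_eq_k_of_hit k _ m hmk hmem]
      omega
    · rw [if_neg hmem]
      have := le_maxR k (arr.drop i.toNat) m
      omega
  · rw [goA_of_gt k _ m m (by omega) le_rfl]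
    by_cases hmem : (k - m) ∈ arr.drop i.toNat
    · rw [if_pos hmem, if_pos hmem]
    · rw [if_neg hmem, if_neg hmem, maxR_of_gt k _ m (by omega)]
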